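-- pv_equiv track=rewrite | github.com/colinroybell/aoc2019 | aoc2019/day1.py | fuel_needed
-- ===== SOURCE A (Python) =====
-- def fuel_needed(mass, part):
--     assert(part == 'a' or part == 'b')
--     fuel_sum = 0
--     while mass > 0:
--             fuel = mass // 3 - 2
--             if fuel < 0:
--                 fuel = 0
--             fuel_sum += fuel
--             # Only recurse for part b
--             if (part == 'a'):
--                 fuel = 0
--             mass = fuel
--     return fuel_sum
-- ===== SOURCE B (Python) =====
-- def fuel_needed(mass, part):
--     assert(part == 'a' or part == 'b')
--     if mass <= 0:
--         return 0
--     fuel = max(0, mass // 3 - 2)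
--     if part == 'a':
--         return fuel
--     return fuel + fuel_needed(fuel, part)
-- ===== Notes on version B (the rewrite author's own statement) =====
-- stated objective: simpler
-- what changed: Replaces the while-loop with an explicit fuel_sum accumulator by direct recursion on the fuel recurrence (base case mass <= 0, one max-clamped step, recurse only for part 'b').
import Mathlib
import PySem

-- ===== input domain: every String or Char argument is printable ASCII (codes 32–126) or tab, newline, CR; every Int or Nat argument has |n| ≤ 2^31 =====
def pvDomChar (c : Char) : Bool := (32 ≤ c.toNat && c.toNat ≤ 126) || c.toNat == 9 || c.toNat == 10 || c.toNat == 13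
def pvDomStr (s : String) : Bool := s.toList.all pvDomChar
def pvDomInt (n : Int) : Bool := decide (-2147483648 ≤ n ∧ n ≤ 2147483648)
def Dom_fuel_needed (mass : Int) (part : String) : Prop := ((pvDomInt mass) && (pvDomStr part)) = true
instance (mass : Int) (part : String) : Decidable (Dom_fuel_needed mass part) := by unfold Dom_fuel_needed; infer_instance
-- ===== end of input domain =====

-- B replaces A's while-loop with an accumulator by direct recursion on the fuel recurrence (objective: simpler).


-- termination helper for both ports: one fuel step strictly shrinks a positive mass
theorem pvFuelStep_lt (mass : Int) (h : 0 < mass) :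
    (if PySem.Int.floordiv mass 3 - 2 < 0 then (0:Int) else PySem.Int.floordiv mass 3 - 2).toNat < mass.toNat := by
  rw [PySem.Int.floordiv_eq_ediv_of_pos (by omega)]
  have h3 : mass / 3 ≤ mass := Int.ediv_le_self _ (le_of_lt h)
  split <;> omega

-- ===== PORT A =====
-- the while loop, with fuel_sum as accumulator
def fuelLoop (mass fuel_sum : Int) (part : String) : Int :=
  if h : mass > 0 then
    let fuel := PySem.Int.floordiv mass 3 - 2
    let fuel := if fuel < 0 then 0 else fuel
    let fuel_sum := fuel_sum + fuel
    let fuel := if part == "a" then 0 else fuel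
    fuelLoop fuel fuel_sum part
  else fuel_sum
termination_by mass.toNat
decreasing_by
  have := pvFuelStep_lt mass h
  split <;> simp_all

def fuel_needed (mass : Int) (part : String) : Int :=
  -- assert(part == 'a' or part == 'b') raises outside Pre_fuel_needed
  fuelLoop mass 0 part

-- ===== PORT B =====
def fuel_needed_alt (mass : Int) (part : String) : Int :=
  -- assert(part == 'a' or part == 'b') raises outside Pre_fuel_needed
  if h : mass ≤ 0 then 0
  else
    let fuel := max 0 (PySem.Int.floordiv mass 3 - 2)
    if part == "a" then fuel else fuel + fuel_needed_alt fuel part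
termination_by mass.toNat
decreasing_by
  have := pvFuelStep_lt mass (by omega)
  have : (max 0 (PySem.Int.floordiv mass 3 - 2)).toNat < mass.toNat := by
    by_cases h1 : PySem.Int.floordiv mass 3 - 2 < 0 <;> simp_all <;> omega
  omega

-- ===== PRECONDITION & SPEC =====
-- Pre_ excludes exactly the inputs where A's (and B's) assert raises AssertionError.
def Pre_fuel_needed (mass : Int) (part : String) : Prop := part = "a" ∨ part = "b"
instance (mass : Int) (part : String) : Decidable (Pre_fuel_needed mass part) := by unfold Pre_fuel_needed; infer_instance
def pvWitness_fuel_needed : Int × String := (12, "b")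
def Spec_fuel_needed (mass : Int) (part : String) (out : Int) : Prop := out = fuel_needed_alt mass part
instance (mass : Int) (part : String) (out : Int) : Decidable (Spec_fuel_needed mass part out) := by unfold Spec_fuel_needed; infer_instance

-- ===== CLAIM (what is proved, stated in full; the proofs are below) =====
def Claim_equal_fuel_needed : Prop := ∀ (mass : Int) (part : String), Dom_fuel_needed mass part → Pre_fuel_needed mass part → Spec_fuel_needed mass part (fuel_needed mass part)

-- ===== LEMMAS AND PROOFS =====

theorem pvClamp_eq (f : Int) : (if f < 0 then (0:Int) else f) = max 0 f := by
  by_cases h : f < 0 <;> simp [h] <;> omega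

-- loop/recursion bridge: the accumulator comes out front
theorem fuelLoop_eq_alt (n : Nat) (mass acc : Int) (part : String)
    (hn : mass.toNat ≤ n) (hp : part = "a" ∨ part = "b") :
    fuelLoop mass acc part = acc + fuel_needed_alt mass part := by
  induction n generalizing mass acc with
  | zero =>
      have hm : ¬ mass > 0 := by omega
      rw [fuelLoop, fuel_needed_alt]
      simp [hm, show mass ≤ 0 by omega]
  | succ n ih =>
      by_cases hm : mass > 0
      · have hstep := pvFuelStep_lt mass hm
        rw [fuelLoop, fuel_needed_alt]
        simp only [hm, dite_true, show ¬ mass ≤ 0 by omega, dite_false, pvClamp_eq]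
        rcases hp with hp | hp <;> subst hp
        · simp only [beq_self_eq_true, if_true]
          rw [fuelLoop]
          simp
        · simp only [show ("b" == "a") = false from rfl, Bool.false_eq_true, if_false]
          rw [ih (max 0 (PySem.Int.floordiv mass 3 - 2)) _ (by rw [pvClamp_eq] at hstep; omega)]
          ring
      · rw [fuelLoop, fuel_needed_alt]
        simp [hm, show mass ≤ 0 by omega]

-- ===== VERDICT (by name: the statement is the Claim_ definition above) =====
theorem fuel_needed_spec : Claim_equal_fuel_needed := by
  intro mass part _ hp
  unfold Spec_fuel_needed fuel_needed
  simpa using fuelLoop_eq_alt mass.toNat mass 0 part le_rfl hp
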